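-- pv_equiv track=rewrite | github.com/IITB-LEAP-OCR/SPRINT | src/otsl_to_htlml.py | convert_to_html
-- ===== SOURCE A (Python) =====
-- def count_contiguous_occurrences(s, target_char):
--     count = 0
--     for char in s:
--         if char == target_char:
--             count += 1
--         else:
--             break
--     return count
--
-- def get_cell_spans(otsl_matrix, i, j):
--     entry = otsl_matrix[i][j]
--     if entry != 'C':
--         return 0, 0
--     else:
--         row_seq = ''.join(otsl_matrix[i])[j + 1:]
--         col_seq = ''.join(row[j] for row in otsl_matrix)[i + 1:]
--         rs = count_contiguous_occurrences(row_seq, 'L')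
--         cs = count_contiguous_occurrences(col_seq, 'U')
--         return rs, cs
--
-- def get_conv_html_from_otsl(otsl_matrix, R, C):
--     html_string = '<html><table><tbody>'
--     # Generate string
--     for i in range(R):
--         html_string += '<tr>'
--         for j in range(C + 1):
--             e = otsl_matrix[i][j]
--             if e == 'C':
--                 rs, cs = get_cell_spans(otsl_matrix, i, j)
--                 if rs and cs:
--                     #There is rowspan and colspan
--                     html_string += f'<td rowpsan="{rs + 1}" colspan="{cs + 1}"></td>'
--                 elif rs and not cs:
--                     # There is only row span
--                     html_string += f'<td colspan="{rs + 1}"></td>'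
--                 elif not rs and cs:
--                     # There is only col span
--                     html_string += f'<td rowspan="{cs + 1}"></td>'
--                 else:
--                     # Normal cell
--                     html_string += '<td></td>'
--             elif e == 'N':
--                 # New row will start
--                 html_string += '</tr>'
--             else:
--                 continue
--     html_string += '</tbody></table></html>'
--     return html_string
--
-- def convert_to_html(otsl_string, R, C):
--     # Get N(sequence length), R(rows), C(cols)
--     # C = int(otsl_string.find('N'))
--     N = len(otsl_string)
--
--     if N != (C + 1) * R:
--         # Needs correction
--         actual_N = (C + 1) * R
--         if N > actual_N:
--             otsl_string = otsl_string[:actual_N]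
--             otsl_string = otsl_string[:-1] + 'N'
--         else:
--             diff = actual_N - N
--             suffix = 'C' * (diff - 1) + 'N'
--             otsl_string = otsl_string + suffix
--
--     # Init OTSL matrix
--     otsl_matrix = [[otsl_string[i * (C + 1) + j] for j in range(C + 1)] for i in range(R)]
--
--     # Handle for 'U' in first row, replace by 'C'
--     for i in range(len(otsl_matrix[0])):
--         if otsl_matrix[0][i] == 'U':
--             otsl_matrix[0][i] = 'C'
--
--     # Handle for L in first column, replace by 'C'
--     for i in range(R):
--         if otsl_matrix[i][0] == 'L':
--             otsl_matrix[i][0] = 'C'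
--
--     # Return converted string
--     return get_conv_html_from_otsl(otsl_matrix, R, C)
-- ===== SOURCE B (Python) =====
-- def _runs(chars, target):
--     # res[k] = length of the contiguous run of `target` starting at index k (res[len] = 0)
--     res = [0]
--     for ch in reversed(chars):
--         res.append(res[-1] + 1 if ch == target else 0)
--     res.reverse()
--     return res
--
-- def convert_to_html(otsl_string, R, C):
--     W = C + 1
--     n = W * R
--     N = len(otsl_string)
--     if N > n:
--         s = otsl_string[:n - 1] + 'N'
--     elif N < n:
--         s = otsl_string + 'C' * (n - N - 1) + 'N'
--     else:
--         s = otsl_string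
--     # build the grid, normalising first-row 'U' and first-column 'L' to 'C'
--     grid = []
--     for i in range(R):
--         row = list(s[i * W:(i + 1) * W])
--         if i == 0:
--             row = ['C' if ch == 'U' else ch for ch in row]
--         if row[0] == 'L':
--             row[0] = 'C'
--         grid.append(row)
--     # O(R*W) precomputed run lengths instead of per-cell joins and rescans
--     lruns = [_runs(row, 'L') for row in grid]
--     cols = [[grid[i][j] for i in range(R)] for j in range(W)]
--     uruns = [_runs(col, 'U') for col in cols]
--     out = ['<html><table><tbody>']
--     for i in range(R):
--         out.append('<tr>')
--         for j in range(W):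
--             e = grid[i][j]
--             if e == 'C':
--                 rs = lruns[i][j + 1]
--                 cs = uruns[j][i + 1]
--                 if rs and cs:
--                     out.append(f'<td rowpsan="{rs + 1}" colspan="{cs + 1}"></td>')
--                 elif rs:
--                     out.append(f'<td colspan="{rs + 1}"></td>')
--                 elif cs:
--                     out.append(f'<td rowspan="{cs + 1}"></td>')
--                 else:
--                     out.append('<td></td>')
--             elif e == 'N':
--                 out.append('</tr>')
--     out.append('</tbody></table></html>')
--     return ''.join(out)
-- ===== Notes on version B (the rewrite author's own statement) =====
-- stated objective: faster
-- what changed: Replaces the per-cell row/column string joins and rescans with run-length tables ('L' per row, 'U' per column) precomputed in one backward pass each, so every cell's spans are O(1) lookups: O(R*C) total instead of O(R*C*(R+C)).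
import Mathlib
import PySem

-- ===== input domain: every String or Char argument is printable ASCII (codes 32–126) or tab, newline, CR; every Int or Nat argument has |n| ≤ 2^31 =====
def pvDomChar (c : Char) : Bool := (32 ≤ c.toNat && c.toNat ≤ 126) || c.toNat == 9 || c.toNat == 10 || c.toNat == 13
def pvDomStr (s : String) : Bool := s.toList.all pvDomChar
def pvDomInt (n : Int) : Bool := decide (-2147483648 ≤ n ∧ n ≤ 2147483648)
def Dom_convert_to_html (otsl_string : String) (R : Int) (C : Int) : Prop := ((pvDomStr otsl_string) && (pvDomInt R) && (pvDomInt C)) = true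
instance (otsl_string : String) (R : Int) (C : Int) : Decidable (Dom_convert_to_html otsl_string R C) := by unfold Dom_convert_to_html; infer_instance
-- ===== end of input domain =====

-- B replaces A's per-cell row/column joins+rescans by run-length tables precomputed in one backward pass per row/column (faster: O(R*C) instead of O(R*C*(R+C)), measured).

-- ===== PORT A =====
-- count_contiguous_occurrences (count accumulator; `break` = stop recursing)
def pvCountContigGo (s : List Char) (target : Char) (count : Int) : Int :=
  match s with
  | [] => count
  | c :: cs => if c = target then pvCountContigGo cs target (count + 1) else count

def pvCountContig (s : List Char) (target : Char) : Int :=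
  pvCountContigGo s target 0

-- get_cell_spans (matrix entries are single characters, so ''.join(otsl_matrix[i]) is the row itself)
def pvGetCellSpans (m : List (List Char)) (i j : Int) : Int × Int :=
  let entry := PySem.List.pyGetD (PySem.List.pyGetD m i []) j ' '
  if entry ≠ 'C' then (0, 0)
  else
    let row_seq := PySem.List.slice (PySem.List.pyGetD m i []) (some (j + 1)) none
    let col_seq := PySem.List.slice (m.map (fun row => PySem.List.pyGetD row j ' ')) (some (i + 1)) none
    let rs := pvCountContig row_seq 'L'
    let cs := pvCountContig col_seq 'U'
    (rs, cs)

-- get_conv_html_from_otsl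
def pvGetConvHtml (m : List (List Char)) (R C : Int) : List Char :=
  let html := "<html><table><tbody>".toList
  let html := (PySem.List.pyRange 0 R 1).foldl (fun html i =>
    let html := html ++ "<tr>".toList
    (PySem.List.pyRange 0 (C + 1) 1).foldl (fun html j =>
      let e := PySem.List.pyGetD (PySem.List.pyGetD m i []) j ' '
      if e = 'C' then
        let rc := pvGetCellSpans m i j
        if rc.1 ≠ 0 ∧ rc.2 ≠ 0 then
          html ++ "<td rowpsan=\"".toList ++ PySem.Int.toChars (rc.1 + 1) ++ "\" colspan=\"".toList
               ++ PySem.Int.toChars (rc.2 + 1) ++ "\"></td>".toList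
        else if rc.1 ≠ 0 ∧ rc.2 = 0 then
          html ++ "<td colspan=\"".toList ++ PySem.Int.toChars (rc.1 + 1) ++ "\"></td>".toList
        else if rc.1 = 0 ∧ rc.2 ≠ 0 then
          html ++ "<td rowspan=\"".toList ++ PySem.Int.toChars (rc.2 + 1) ++ "\"></td>".toList
        else
          html ++ "<td></td>".toList
      else if e = 'N' then html ++ "</tr>".toList
      else html) html) html
  html ++ "</tbody></table></html>".toList

def convert_to_html (otsl_string : String) (R : Int) (C : Int) : String :=
  let s0 := otsl_string.toList
  let N : Int := (s0.length : Int)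
  let s :=
    if N ≠ (C + 1) * R then
      let actual_N := (C + 1) * R
      if N > actual_N then
        let s1 := PySem.List.slice s0 none (some actual_N)
        PySem.List.slice s1 none (some (-1)) ++ ['N']
      else
        let diff := actual_N - N
        s0 ++ (List.replicate (diff - 1).toNat 'C' ++ ['N'])
    else s0
  let matrix := (PySem.List.pyRange 0 R 1).map (fun i =>
    (PySem.List.pyRange 0 (C + 1) 1).map (fun j => PySem.List.pyGetD s (i * (C + 1) + j) ' '))
  let matrix := (PySem.List.pyRange 0 ((PySem.List.pyGetD matrix 0 []).length : Int) 1).foldl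
    (fun m i =>
      if PySem.List.pyGetD (PySem.List.pyGetD m 0 []) i ' ' = 'U' then
        PySem.List.pySetD m 0 (PySem.List.pySetD (PySem.List.pyGetD m 0 []) i 'C')
      else m) matrix
  let matrix := (PySem.List.pyRange 0 R 1).foldl
    (fun m i =>
      if PySem.List.pyGetD (PySem.List.pyGetD m i []) 0 ' ' = 'L' then
        PySem.List.pySetD m i (PySem.List.pySetD (PySem.List.pyGetD m i []) 0 'C')
      else m) matrix
  String.ofList (pvGetConvHtml matrix R C)

-- ===== PORT B =====
-- _runs: one backward pass collecting suffix run lengths (res[-1] is the previous entry), then reversed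
def pvRunsB (chars : List Char) (target : Char) : List Int :=
  let res := chars.reverse.foldl (fun res ch =>
    res ++ [if ch = target then PySem.List.pyGetD res (-1) 0 + 1 else 0]) [0]
  res.reverse

def convert_to_html_alt (otsl_string : String) (R : Int) (C : Int) : String :=
  let W := C + 1
  let n := W * R
  let s0 := otsl_string.toList
  let N : Int := (s0.length : Int)
  let s :=
    if N > n then PySem.List.slice s0 none (some (n - 1)) ++ ['N']
    else if N < n then s0 ++ (List.replicate (n - N - 1).toNat 'C' ++ ['N'])
    else s0
  let grid := (PySem.List.pyRange 0 R 1).foldl (fun grid i =>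
    let row := PySem.List.slice s (some (i * W)) (some ((i + 1) * W))
    let row := if i = 0 then row.map (fun ch => if ch = 'U' then 'C' else ch) else row
    let row := if PySem.List.pyGetD row 0 ' ' = 'L' then PySem.List.pySetD row 0 'C' else row
    grid ++ [row]) []
  let lruns := grid.map (fun row => pvRunsB row 'L')
  let cols := (PySem.List.pyRange 0 W 1).map (fun j =>
    (PySem.List.pyRange 0 R 1).map (fun i => PySem.List.pyGetD (PySem.List.pyGetD grid i []) j ' '))
  let uruns := cols.map (fun col => pvRunsB col 'U')
  let parts := ["<html><table><tbody>".toList]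
  let parts := (PySem.List.pyRange 0 R 1).foldl (fun parts i =>
    let parts := parts ++ ["<tr>".toList]
    (PySem.List.pyRange 0 W 1).foldl (fun parts j =>
      let e := PySem.List.pyGetD (PySem.List.pyGetD grid i []) j ' '
      if e = 'C' then
        let rs := PySem.List.pyGetD (PySem.List.pyGetD lruns i []) (j + 1) 0
        let cs := PySem.List.pyGetD (PySem.List.pyGetD uruns j []) (i + 1) 0
        if rs ≠ 0 ∧ cs ≠ 0 then
          parts ++ ["<td rowpsan=\"".toList ++ PySem.Int.toChars (rs + 1) ++ "\" colspan=\"".toList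
                    ++ PySem.Int.toChars (cs + 1) ++ "\"></td>".toList]
        else if rs ≠ 0 then
          parts ++ ["<td colspan=\"".toList ++ PySem.Int.toChars (rs + 1) ++ "\"></td>".toList]
        else if cs ≠ 0 then
          parts ++ ["<td rowspan=\"".toList ++ PySem.Int.toChars (cs + 1) ++ "\"></td>".toList]
        else parts ++ ["<td></td>".toList]
      else if e = 'N' then parts ++ ["</tr>".toList]
      else parts) parts) parts
  let parts := parts ++ ["</tbody></table></html>".toList]
  String.ofList (PySem.Chars.join [] parts)

-- ===== PRECONDITION & SPEC =====
-- Pre_ excludes R ≤ 0 and C < 0, on which Python A raises IndexError (empty matrix / empty rows).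
def Pre_convert_to_html (otsl_string : String) (R : Int) (C : Int) : Prop := 1 ≤ R ∧ 0 ≤ C
instance (otsl_string : String) (R : Int) (C : Int) : Decidable (Pre_convert_to_html otsl_string R C) := by unfold Pre_convert_to_html; infer_instance
def pvWitness_convert_to_html : String × Int × Int := ("CLUN", 2, 1)

def Spec_convert_to_html (otsl_string : String) (R : Int) (C : Int) (out : String) : Prop := out = convert_to_html_alt otsl_string R C
instance (otsl_string : String) (R : Int) (C : Int) (out : String) : Decidable (Spec_convert_to_html otsl_string R C out) := by unfold Spec_convert_to_html; infer_instance

-- ===== CLAIM (what is proved, stated in full; the proofs are below) =====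
def Claim_equal_convert_to_html : Prop := ∀ (otsl_string : String) (R : Int) (C : Int), Dom_convert_to_html otsl_string R C → Pre_convert_to_html otsl_string R C → Spec_convert_to_html otsl_string R C (convert_to_html otsl_string R C)
-- ===== LEMMAS AND PROOFS =====

theorem pv_go_eq (s : List Char) (t : Char) (n : Int) :
    pvCountContigGo s t n = n + pvCountContig s t := by
  induction s generalizing n with
  | nil => simp [pvCountContigGo, pvCountContig]
  | cons c cs ih =>
    simp only [pvCountContigGo, pvCountContig]
    by_cases h : c = t
    · simp [h, ih]; omega
    · simp [h]

-- recursion form of B's _runs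
def pvRunsRec (chars : List Char) (t : Char) : List Int :=
  match chars with
  | [] => [0]
  | c :: cs => (if c = t then (pvRunsRec cs t).headD 0 + 1 else 0) :: pvRunsRec cs t

theorem pv_foldstep_ne_nil (t : Char) (l : List Char) (init : List Int) (h : init ≠ []) :
    l.foldl (fun res ch => res ++ [if ch = t then PySem.List.pyGetD res (-1) 0 + 1 else 0]) init ≠ [] := by
  induction l generalizing init with
  | nil => exact h
  | cons c cs ih => exact ih _ (by simp)

theorem pv_headD_eq_head {α : Type} (d : α) (l : List α) (h : l ≠ []) : l.headD d = l.head h := by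
  cases l with
  | nil => exact absurd rfl h
  | cons a l => rfl

theorem pvRunsB_eq (chars : List Char) (t : Char) : pvRunsB chars t = pvRunsRec chars t := by
  induction chars with
  | nil => simp [pvRunsB, pvRunsRec]
  | cons c cs ih =>
    have hne : cs.reverse.foldl (fun res ch => res ++ [if ch = t then PySem.List.pyGetD res (-1) 0 + 1 else 0]) ([0] : List Int) ≠ [] :=
      pv_foldstep_ne_nil t _ _ (by simp)
    have h1 : pvRunsB (c :: cs) t =
        (if c = t then PySem.List.pyGetD (cs.reverse.foldl (fun res ch => res ++ [if ch = t then PySem.List.pyGetD res (-1) 0 + 1 else 0]) ([0] : List Int)) (-1) 0 + 1 else 0) :: pvRunsB cs t := by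
      simp [pvRunsB, List.foldl_append]
    have h2 : PySem.List.pyGetD (cs.reverse.foldl (fun res ch => res ++ [if ch = t then PySem.List.pyGetD res (-1) 0 + 1 else 0]) ([0] : List Int)) (-1) 0 = (pvRunsRec cs t).headD 0 := by
      rw [PySem.List.pyGetD_neg_one _ _ hne, ← ih]
      rw [List.getLast_eq_head_reverse]
      simp only [pvRunsB]
      exact (pv_headD_eq_head 0 _ (by simpa using hne)).symm
    rw [h1, ih, h2]
    rfl

theorem pvRunsRec_getD (row : List Char) (t : Char) (k : Nat) (hk : k ≤ row.length) :
    (pvRunsRec row t).getD k 0 = pvCountContig (row.drop k) t := by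
  induction row generalizing k with
  | nil =>
    have : k = 0 := Nat.le_zero.mp hk
    subst this
    simp [pvRunsRec, pvCountContig, pvCountContigGo]
  | cons c cs ih =>
    cases k with
    | zero =>
      simp only [pvRunsRec, List.getD_cons_zero, List.drop_zero, pvCountContig, pvCountContigGo]
      by_cases h : c = t
      · have h0 : (pvRunsRec cs t).headD 0 = (pvRunsRec cs t).getD 0 0 := by
          cases pvRunsRec cs t <;> rfl
        rw [if_pos h, if_pos h, h0, ih 0 (by simp), pv_go_eq]
        simp [pvCountContig]
        omega
      · simp [h]
    | succ k' =>
      simp only [pvRunsRec, List.getD_cons_succ, List.drop_succ_cons]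
      exact ih k' (by simpa using hk)

-- fold over (range n).map (·+1) on a cons acts on the tail
theorem pv_foldl_shift {α : Type} (p : α → Prop) [DecidablePred p] (g : α → α) (d : α) (l : List Nat) (x : α) (xs : List α) :
    (l.map (· + 1)).foldl (fun acc k => if p (acc.getD k d) then acc.set k (g (acc.getD k d)) else acc) (x :: xs)
    = x :: l.foldl (fun acc k => if p (acc.getD k d) then acc.set k (g (acc.getD k d)) else acc) xs := by
  induction l generalizing xs with
  | nil => rfl
  | cons a l ih =>
    simp only [List.map_cons, List.foldl_cons, List.getD_cons_succ, List.set_cons_succ]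
    by_cases h : p (xs.getD a d)
    · rw [if_pos h, if_pos h]; exact ih _
    · rw [if_neg h, if_neg h]; exact ih _

theorem pv_foldl_setif {α : Type} (p : α → Prop) [DecidablePred p] (g : α → α) (d : α) (m : List α) :
    (List.range m.length).foldl (fun acc k => if p (acc.getD k d) then acc.set k (g (acc.getD k d)) else acc) m
    = m.map (fun x => if p x then g x else x) := by
  induction m with
  | nil => rfl
  | cons x xs ih =>
    rw [List.length_cons, List.range_succ_eq_map, List.foldl_cons]
    by_cases h : p x
    · simp only [List.getD_cons_zero]
      rw [if_pos h]
      simp only [List.set_cons_zero]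
      have : (List.range xs.length).map Nat.succ = (List.range xs.length).map (· + 1) := by
        simp
      rw [this, pv_foldl_shift, ih]
      simp [h]
    · simp only [List.getD_cons_zero]
      rw [if_neg h]
      have : (List.range xs.length).map Nat.succ = (List.range xs.length).map (· + 1) := by
        simp
      rw [this, pv_foldl_shift, ih]
      simp [h]

theorem pv_join_nil (ps : List (List Char)) : PySem.Chars.join [] ps = ps.flatten := by
  induction ps with
  | nil => simp [PySem.Chars.join_nil]
  | cons a l ih =>
    cases l with
    | nil => simp [PySem.Chars.join_singleton]
    | cons b m => rw [PySem.Chars.join_cons_cons, ih]; simp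

-- canonical intermediate values shared by both proofs
def pvFixS (s0 : List Char) (n : Nat) : List Char :=
  if n < s0.length then s0.take (n - 1) ++ ['N']
  else if s0.length < n then s0 ++ (List.replicate (n - s0.length - 1) 'C' ++ ['N'])
  else s0

def pvU2C (row : List Char) : List Char := row.map (fun ch => if ch = 'U' then 'C' else ch)

def pvLfix (row : List Char) : List Char := if row.getD 0 ' ' = 'L' then row.set 0 'C' else row

def pvRowC (s : List Char) (w i : Nat) : List Char := (s.drop (i * w)).take w

def pvGrid (s : List Char) (r w : Nat) : List (List Char) :=
  (List.range r).map (fun i => pvLfix (if i = 0 then pvU2C (pvRowC s w i) else pvRowC s w i))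

def pvTd (rs cs : Int) : List Char :=
  if rs ≠ 0 ∧ cs ≠ 0 then
    "<td rowpsan=\"".toList ++ PySem.Int.toChars (rs + 1) ++ "\" colspan=\"".toList
      ++ PySem.Int.toChars (cs + 1) ++ "\"></td>".toList
  else if rs ≠ 0 then "<td colspan=\"".toList ++ PySem.Int.toChars (rs + 1) ++ "\"></td>".toList
  else if cs ≠ 0 then "<td rowspan=\"".toList ++ PySem.Int.toChars (cs + 1) ++ "\"></td>".toList
  else "<td></td>".toList

def pvColC (g : List (List Char)) (j : Nat) : List Char := g.map (fun row => row.getD j ' ')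

def pvCell (g : List (List Char)) (i j : Nat) : List Char :=
  let e := (g.getD i []).getD j ' '
  if e = 'C' then
    pvTd (pvCountContig ((g.getD i []).drop (j + 1)) 'L')
         (pvCountContig ((pvColC g j).drop (i + 1)) 'U')
  else if e = 'N' then "</tr>".toList
  else []

def pvCanon (s0 : List Char) (r w : Nat) : List Char :=
  let g := pvGrid (pvFixS s0 (w * r)) r w
  "<html><table><tbody>".toList
    ++ (List.range r).flatMap (fun i => "<tr>".toList ++ (List.range w).flatMap (fun j => pvCell g i j))
    ++ "</tbody></table></html>".toList

theorem pvFixS_length (s0 : List Char) (n : Nat) (hn : 1 ≤ n) : (pvFixS s0 n).length = n := by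
  unfold pvFixS
  split_ifs with h1 h2
  · simp only [List.length_append, List.length_take, List.length_cons, List.length_nil]; omega
  · simp only [List.length_append, List.length_replicate, List.length_cons, List.length_nil]; omega
  · omega

theorem pv_row_eq (s : List Char) (a w : Nat) (h : a + w ≤ s.length) :
    (List.range w).map (fun j => s.getD (a + j) ' ') = (s.drop a).take w := by
  apply List.ext_getElem
  · simp; omega
  · intro k hk1 hk2
    simp only [List.getElem_map, List.getElem_range, List.getElem_take, List.getElem_drop]
    rw [List.getD_eq_getElem s ' ' (by simp at hk1; omega)]

theorem pv_map_range_getD {α β : Type} (g : List α) (d : α) (f : α → β) :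
    (List.range g.length).map (fun i => f (g.getD i d)) = g.map f := by
  apply List.ext_getElem
  · simp
  · intro k hk1 hk2
    simp only [List.getElem_map, List.getElem_range]
    rw [List.getD_eq_getElem g d (by simpa using hk1)]

theorem pv_pyRange_nat (n : Nat) : PySem.List.pyRange 0 (n : Int) 1 = (List.range n).map (fun (k : Nat) => (k : Int)) := by
  rw [PySem.List.pyRange_one]
  simp

theorem pv_fold_range_nat {α : Type} (f : α → Int → α) (init : α) (n : Nat) :
    (PySem.List.pyRange 0 (n : Int) 1).foldl f init = (List.range n).foldl (fun a (k : Nat) => f a (k : Int)) init := by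
  rw [pv_pyRange_nat, List.foldl_map]

theorem pv_fixA (s0 : List Char) (n : Nat) (hn : 1 ≤ n) :
    (if (s0.length : Int) ≠ (n : Int) then
        if (s0.length : Int) > (n : Int) then
          PySem.List.slice (PySem.List.slice s0 none (some (n : Int))) none (some (-1)) ++ ['N']
        else s0 ++ (List.replicate ((n : Int) - (s0.length : Int) - 1).toNat 'C' ++ ['N'])
      else s0) = pvFixS s0 n := by
  unfold pvFixS
  rcases Nat.lt_trichotomy n s0.length with h | h | h
  · rw [if_pos (by exact_mod_cast Nat.ne_of_gt h), if_pos (by exact_mod_cast h), if_pos h]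
    rw [PySem.List.slice_to_natCast, PySem.List.slice_to_neg_one]
    congr 1
    rw [List.dropLast_eq_take]
    rw [List.take_take, List.length_take]
    congr 1
    omega
  · rw [if_neg (by omega), if_neg (by omega), if_neg (by omega)]
  · rw [if_pos (by exact_mod_cast Nat.ne_of_lt h), if_neg (by exact_mod_cast Nat.not_lt.mpr (le_of_lt h)), if_neg (by omega), if_pos h]
    congr 3
    omega

theorem pv_fixB (s0 : List Char) (n : Nat) (hn : 1 ≤ n) :
    (if (s0.length : Int) > (n : Int) then PySem.List.slice s0 none (some ((n : Int) - 1)) ++ ['N']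
      else if (s0.length : Int) < (n : Int) then
        s0 ++ (List.replicate ((n : Int) - (s0.length : Int) - 1).toNat 'C' ++ ['N'])
      else s0) = pvFixS s0 n := by
  unfold pvFixS
  rcases Nat.lt_trichotomy n s0.length with h | h | h
  · rw [if_pos (by exact_mod_cast h), if_pos h]
    have : ((n : Int) - 1) = ((n - 1 : Nat) : Int) := by omega
    rw [this, PySem.List.slice_to_natCast]
  · rw [if_neg (by omega), if_neg (by omega), if_neg (by omega), if_neg (by omega)]
  · rw [if_neg (by exact_mod_cast Nat.not_lt.mpr (le_of_lt h)), if_pos (by exact_mod_cast h), if_neg (by omega), if_pos h]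
    congr 3
    omega

theorem pv_ufold (l : List Int) (r0 : List Char) (rest : List (List Char)) :
    l.foldl (fun m i =>
        if PySem.List.pyGetD (PySem.List.pyGetD m 0 []) i ' ' = 'U' then
          PySem.List.pySetD m 0 (PySem.List.pySetD (PySem.List.pyGetD m 0 []) i 'C')
        else m) (r0 :: rest)
    = (l.foldl (fun row i => if PySem.List.pyGetD row i ' ' = 'U' then PySem.List.pySetD row i 'C' else row) r0) :: rest := by
  induction l generalizing r0 with
  | nil => rfl
  | cons a l ih =>
    simp only [List.foldl_cons]
    have e1 : PySem.List.pyGetD (r0 :: rest) 0 [] = r0 := by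
      rw [PySem.List.pyGetD_zero]
      rfl
    by_cases h : PySem.List.pyGetD r0 a ' ' = 'U'
    · rw [show (if PySem.List.pyGetD (PySem.List.pyGetD (r0 :: rest) 0 []) a ' ' = 'U' then
            PySem.List.pySetD (r0 :: rest) 0 (PySem.List.pySetD (PySem.List.pyGetD (r0 :: rest) 0 []) a 'C')
          else (r0 :: rest)) = PySem.List.pySetD r0 a 'C' :: rest from by
        rw [e1, if_pos h, PySem.List.pySetD_of_nonneg _ _ (by omega)]
        rfl]
      rw [if_pos h]
      exact ih _
    · rw [show (if PySem.List.pyGetD (PySem.List.pyGetD (r0 :: rest) 0 []) a ' ' = 'U' then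
            PySem.List.pySetD (r0 :: rest) 0 (PySem.List.pySetD (PySem.List.pyGetD (r0 :: rest) 0 []) a 'C')
          else (r0 :: rest)) = r0 :: rest from by rw [e1, if_neg h]]
      rw [if_neg h]
      exact ih _

theorem pv_rowUfix (r0 : List Char) :
    (PySem.List.pyRange 0 (r0.length : Int) 1).foldl
      (fun row i => if PySem.List.pyGetD row i ' ' = 'U' then PySem.List.pySetD row i 'C' else row) r0
    = pvU2C r0 := by
  rw [pv_fold_range_nat]
  simp only [PySem.List.pyGetD_natCast, PySem.List.pySetD_natCast]
  exact (pv_foldl_setif (fun x => x = 'U') (fun _ => 'C') ' ' r0).trans (by rfl)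

theorem pv_gridLfix (m : List (List Char)) :
    (PySem.List.pyRange 0 (m.length : Int) 1).foldl
      (fun m i =>
        if PySem.List.pyGetD (PySem.List.pyGetD m i []) 0 ' ' = 'L' then
          PySem.List.pySetD m i (PySem.List.pySetD (PySem.List.pyGetD m i []) 0 'C')
        else m) m
    = m.map pvLfix := by
  rw [pv_fold_range_nat]
  have hz : ∀ (row : List Char), PySem.List.pySetD row (0 : Int) 'C' = row.set 0 'C' := by
    intro row
    rw [PySem.List.pySetD_of_nonneg _ _ (by omega)]
    rfl
  simp only [PySem.List.pyGetD_natCast, PySem.List.pySetD_natCast, PySem.List.pyGetD_zero, hz]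
  exact (pv_foldl_setif (fun row => row.getD 0 ' ' = 'L') (fun row => row.set 0 'C') [] m).trans (by rfl)

def pvChunkA (m : List (List Char)) (i j : Int) : List Char :=
  let e := PySem.List.pyGetD (PySem.List.pyGetD m i []) j ' '
  if e = 'C' then
    let rc := pvGetCellSpans m i j
    if rc.1 ≠ 0 ∧ rc.2 ≠ 0 then
      "<td rowpsan=\"".toList ++ PySem.Int.toChars (rc.1 + 1) ++ "\" colspan=\"".toList
        ++ PySem.Int.toChars (rc.2 + 1) ++ "\"></td>".toList
    else if rc.1 ≠ 0 ∧ rc.2 = 0 then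
      "<td colspan=\"".toList ++ PySem.Int.toChars (rc.1 + 1) ++ "\"></td>".toList
    else if rc.1 = 0 ∧ rc.2 ≠ 0 then
      "<td rowspan=\"".toList ++ PySem.Int.toChars (rc.2 + 1) ++ "\"></td>".toList
    else "<td></td>".toList
  else if e = 'N' then "</tr>".toList
  else []

theorem pv_emitA (g : List (List Char)) (R C : Int) (r w : Nat)
    (hR : R = (r : Int)) (hC : C + 1 = (w : Int)) :
    pvGetConvHtml g R C
    = "<html><table><tbody>".toList
      ++ (List.range r).flatMap (fun (i : Nat) => "<tr>".toList
            ++ (List.range w).flatMap (fun (j : Nat) => pvChunkA g (i : Int) (j : Int)))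
      ++ "</tbody></table></html>".toList := by
  unfold pvGetConvHtml
  rw [hR, hC]
  have hstep : ∀ i : Int,
      (fun (html : List Char) (j : Int) =>
        let e := PySem.List.pyGetD (PySem.List.pyGetD g i []) j ' '
        if e = 'C' then
          let rc := pvGetCellSpans g i j
          if rc.1 ≠ 0 ∧ rc.2 ≠ 0 then
            html ++ "<td rowpsan=\"".toList ++ PySem.Int.toChars (rc.1 + 1) ++ "\" colspan=\"".toList
              ++ PySem.Int.toChars (rc.2 + 1) ++ "\"></td>".toList
          else if rc.1 ≠ 0 ∧ rc.2 = 0 then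
            html ++ "<td colspan=\"".toList ++ PySem.Int.toChars (rc.1 + 1) ++ "\"></td>".toList
          else if rc.1 = 0 ∧ rc.2 ≠ 0 then
            html ++ "<td rowspan=\"".toList ++ PySem.Int.toChars (rc.2 + 1) ++ "\"></td>".toList
          else html ++ "<td></td>".toList
        else if e = 'N' then html ++ "</tr>".toList
        else html)
      = (fun (html : List Char) (j : Int) => html ++ pvChunkA g i j) := by
    intro i
    funext html j
    unfold pvChunkA
    dsimp only
    split_ifs <;> simp
  simp only [hstep, PySem.List.foldl_append_eq_flatMap]
  have houter :
      (fun (html : List Char) (i : Int) =>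
        (html ++ "<tr>".toList) ++ (PySem.List.pyRange 0 (w : Int) 1).flatMap (fun j => pvChunkA g i j))
      = (fun (html : List Char) (i : Int) =>
        html ++ ("<tr>".toList ++ (PySem.List.pyRange 0 (w : Int) 1).flatMap (fun j => pvChunkA g i j))) := by
    funext html i
    simp
  rw [houter, PySem.List.foldl_append_eq_flatMap]
  rw [pv_pyRange_nat r, pv_pyRange_nat w]
  simp only [List.flatMap_map]

theorem pv_spans (g : List (List Char)) (i j : Nat)
    (he : ((g.getD i []).getD j ' ') = 'C') :
    pvGetCellSpans g (i : Int) (j : Int)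
    = (pvCountContig ((g.getD i []).drop (j + 1)) 'L',
       pvCountContig ((pvColC g j).drop (i + 1)) 'U') := by
  unfold pvGetCellSpans
  simp only [PySem.List.pyGetD_natCast]
  rw [if_neg (not_not_intro he)]
  have h1 : ((j : Int) + 1) = ((j + 1 : Nat) : Int) := by push_cast; ring
  have h2 : ((i : Int) + 1) = ((i + 1 : Nat) : Int) := by push_cast; ring
  rw [h1, h2, PySem.List.slice_from_natCast, PySem.List.slice_from_natCast]
  simp [pvColC]

theorem pv_chunkA_cell (g : List (List Char)) (i j : Nat) :
    pvChunkA g (i : Int) (j : Int) = pvCell g i j := by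
  unfold pvChunkA pvCell
  simp only [PySem.List.pyGetD_natCast]
  by_cases he : ((g.getD i []).getD j ' ') = 'C'
  · rw [if_pos he, if_pos he, pv_spans g i j he]
    unfold pvTd
    dsimp only
    set rs := pvCountContig ((g.getD i []).drop (j + 1)) 'L' with hrs
    set cs := pvCountContig ((pvColC g j).drop (i + 1)) 'U' with hcs
    by_cases h1 : rs = 0 <;> by_cases h2 : cs = 0
    · rw [if_neg (by tauto), if_neg (by tauto), if_neg (by tauto), if_neg (by tauto),
        if_neg (by tauto), if_neg (by tauto)]
    · rw [if_neg (by tauto), if_neg (by tauto), if_pos (by tauto), if_neg (by tauto),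
        if_neg (by tauto), if_pos (by tauto)]
    · rw [if_neg (by tauto), if_pos (by tauto), if_neg (by tauto), if_pos (by tauto)]
    · rw [if_pos (by tauto), if_pos (by tauto)]
  · rw [if_neg he, if_neg he]

theorem pv_matrix0 (s : List Char) (r w : Nat) (hlen : s.length = w * r) :
    (PySem.List.pyRange 0 (r : Int) 1).map (fun i =>
      (PySem.List.pyRange 0 (w : Int) 1).map (fun j => PySem.List.pyGetD s (i * (w : Int) + j) ' '))
    = (List.range r).map (fun i => pvRowC s w i) := by
  rw [pv_pyRange_nat r, List.map_map]
  apply List.map_congr_left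
  intro i hi
  simp only [Function.comp_apply]
  rw [pv_pyRange_nat w, List.map_map]
  have hcast : ∀ j : Nat, ((i : Int) * (w : Int) + (j : Int)) = ((i * w + j : Nat) : Int) := by
    intro j; push_cast; ring
  have hfun : ((fun j => PySem.List.pyGetD s ((i : Int) * (w : Int) + j) ' ') ∘ fun (k : Nat) => (k : Int))
      = (fun j : Nat => s.getD (i * w + j) ' ') := by
    funext j
    simp only [Function.comp_apply, hcast j, PySem.List.pyGetD_natCast]
  rw [hfun]
  unfold pvRowC
  apply pv_row_eq
  simp only [List.mem_range] at hi
  have hb : i * w + w ≤ w * r := by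
    calc i * w + w = (i + 1) * w := by ring
      _ ≤ r * w := Nat.mul_le_mul_right w (by omega)
      _ = w * r := by ring
  omega

theorem pv_rowC_length (s : List Char) (r w : Nat) (hlen : s.length = w * r) (i : Nat) (hi : i < r) :
    (pvRowC s w i).length = w := by
  unfold pvRowC
  simp only [List.length_take, List.length_drop, hlen]
  have : i * w + w ≤ w * r := by
    calc i * w + w = (i + 1) * w := by ring
      _ ≤ r * w := Nat.mul_le_mul_right w (by omega)
      _ = w * r := by ring
  omega

theorem pv_matrix1 (s : List Char) (r w : Nat) (hr : 1 ≤ r) :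
    (PySem.List.pyRange 0
        (((PySem.List.pyGetD ((List.range r).map (fun i => pvRowC s w i)) 0 []).length : Nat) : Int) 1).foldl
      (fun m i =>
        if PySem.List.pyGetD (PySem.List.pyGetD m 0 []) i ' ' = 'U' then
          PySem.List.pySetD m 0 (PySem.List.pySetD (PySem.List.pyGetD m 0 []) i 'C')
        else m)
      ((List.range r).map (fun i => pvRowC s w i))
    = (List.range r).map (fun i => if i = 0 then pvU2C (pvRowC s w i) else pvRowC s w i) := by
  obtain ⟨r', rfl⟩ : ∃ r', r = r' + 1 := ⟨r - 1, by omega⟩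
  rw [List.range_succ_eq_map, List.map_cons, List.map_cons, List.map_map, List.map_map]
  have h0 : PySem.List.pyGetD
      (pvRowC s w 0 :: (List.range r').map ((fun i => pvRowC s w i) ∘ Nat.succ)) 0 []
      = pvRowC s w 0 := by
    rw [PySem.List.pyGetD_zero]
    rfl
  rw [h0, pv_ufold, pv_rowUfix]
  congr 1

theorem pv_matrix2 (s : List Char) (r w : Nat) :
    (PySem.List.pyRange 0 (r : Int) 1).foldl
      (fun m i =>
        if PySem.List.pyGetD (PySem.List.pyGetD m i []) 0 ' ' = 'L' then
          PySem.List.pySetD m i (PySem.List.pySetD (PySem.List.pyGetD m i []) 0 'C')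
        else m)
      ((List.range r).map (fun i => if i = 0 then pvU2C (pvRowC s w i) else pvRowC s w i))
    = pvGrid s r w := by
  have hlen : ((List.range r).map (fun i => if i = 0 then pvU2C (pvRowC s w i) else pvRowC s w i)).length = r := by
    simp
  rw [show (r : Int) = (((List.range r).map (fun i => if i = 0 then pvU2C (pvRowC s w i) else pvRowC s w i)).length : Int) by rw [hlen]]
  rw [pv_gridLfix]
  unfold pvGrid
  rw [List.map_map]
  rfl

theorem pvA_canon (str : String) (R C : Int) (r w : Nat)
    (hR : R = (r : Int)) (hC : C + 1 = (w : Int)) (hr : 1 ≤ r) (hw : 1 ≤ w) :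
    convert_to_html str R C = String.ofList (pvCanon str.toList r w) := by
  have hn : 1 ≤ w * r := Nat.mul_pos hw hr
  unfold convert_to_html
  dsimp only
  rw [hR, hC]
  have hmul : (w : Int) * (r : Int) = ((w * r : Nat) : Int) := by push_cast; ring
  rw [hmul, pv_fixA str.toList (w * r) hn]
  have hlen : (pvFixS str.toList (w * r)).length = w * r := pvFixS_length _ _ hn
  rw [pv_matrix0 (pvFixS str.toList (w * r)) r w hlen,
      pv_matrix1 (pvFixS str.toList (w * r)) r w hr,
      pv_matrix2 (pvFixS str.toList (w * r)) r w,
      pv_emitA (pvGrid (pvFixS str.toList (w * r)) r w) (r : Int) C r w rfl hC]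
  unfold pvCanon
  dsimp only
  simp only [pv_chunkA_cell]

theorem pv_grid_length (s : List Char) (r w : Nat) : (pvGrid s r w).length = r := by
  simp [pvGrid]

theorem pv_grid_row_length (s : List Char) (r w : Nat) (hlen : s.length = w * r)
    (row : List Char) (hmem : row ∈ pvGrid s r w) : row.length = w := by
  unfold pvGrid at hmem
  simp only [List.mem_map, List.mem_range] at hmem
  obtain ⟨i, hi, rfl⟩ := hmem
  have hu : (pvU2C (pvRowC s w i)).length = w := by
    simp [pvU2C, pv_rowC_length s r w hlen i hi]
  have hp : (pvRowC s w i).length = w := pv_rowC_length s r w hlen i hi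
  unfold pvLfix
  split_ifs <;> simp [List.length_set, hu, hp]

theorem pv_flatten_flatMap {α : Type} (l : List α) (f : α → List (List Char)) :
    (l.flatMap f).flatten = l.flatMap (fun x => (f x).flatten) := by
  induction l with
  | nil => rfl
  | cons a l ih => simp [List.flatMap_cons, List.flatten_append, ih]

theorem pv_gridB (s : List Char) (r w : Nat) (hlen : s.length = w * r) :
    (PySem.List.pyRange 0 (r : Int) 1).foldl (fun grid i =>
      grid ++ [
        if PySem.List.pyGetD
            (if i = 0 then
              (PySem.List.slice s (some (i * (w : Int))) (some ((i + 1) * (w : Int)))).map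
                (fun ch => if ch = 'U' then 'C' else ch)
            else PySem.List.slice s (some (i * (w : Int))) (some ((i + 1) * (w : Int)))) 0 ' ' = 'L' then
          PySem.List.pySetD
            (if i = 0 then
              (PySem.List.slice s (some (i * (w : Int))) (some ((i + 1) * (w : Int)))).map
                (fun ch => if ch = 'U' then 'C' else ch)
            else PySem.List.slice s (some (i * (w : Int))) (some ((i + 1) * (w : Int)))) 0 'C'
        else
          (if i = 0 then
            (PySem.List.slice s (some (i * (w : Int))) (some ((i + 1) * (w : Int)))).map
              (fun ch => if ch = 'U' then 'C' else ch)
          else PySem.List.slice s (some (i * (w : Int))) (some ((i + 1) * (w : Int))))]) []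
    = pvGrid s r w := by
  rw [PySem.List.foldl_append_singleton_eq_map, pv_pyRange_nat r, List.map_map]
  unfold pvGrid
  rw [List.nil_append]
  apply List.map_congr_left
  intro i _
  simp only [Function.comp_apply]
  have hslice : PySem.List.slice s (some ((i : Int) * (w : Int))) (some (((i : Int) + 1) * (w : Int)))
      = pvRowC s w i := by
    have h1 : (i : Int) * (w : Int) = ((i * w : Nat) : Int) := by push_cast; ring
    have h2 : ((i : Int) + 1) * (w : Int) = ((i * w : Nat) : Int) + ((w : Nat) : Int) := by push_cast; ring
    rw [h1, h2, PySem.List.slice_natCast_add]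
    rfl
  have hif : (if (i : Int) = 0 then
        (PySem.List.slice s (some ((i : Int) * (w : Int))) (some (((i : Int) + 1) * (w : Int)))).map
          (fun ch => if ch = 'U' then 'C' else ch)
      else PySem.List.slice s (some ((i : Int) * (w : Int))) (some (((i : Int) + 1) * (w : Int))))
      = (if i = 0 then pvU2C (pvRowC s w i) else pvRowC s w i) := by
    by_cases hi0 : i = 0
    · rw [if_pos (by exact_mod_cast hi0), if_pos hi0, hslice]
      rfl
    · rw [if_neg (by exact_mod_cast hi0), if_neg hi0, hslice]
  rw [hif]
  unfold pvLfix
  rw [PySem.List.pyGetD_zero]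
  by_cases hL : (if i = 0 then pvU2C (pvRowC s w i) else pvRowC s w i).getD 0 ' ' = 'L'
  · rw [if_pos hL, if_pos hL, PySem.List.pySetD_of_nonneg _ _ (by omega)]
    rfl
  · rw [if_neg hL, if_neg hL]

def pvChunkB (g : List (List Char)) (lruns uruns : List (List Int)) (i j : Int) : List (List Char) :=
  let e := PySem.List.pyGetD (PySem.List.pyGetD g i []) j ' '
  if e = 'C' then
    let rs := PySem.List.pyGetD (PySem.List.pyGetD lruns i []) (j + 1) 0
    let cs := PySem.List.pyGetD (PySem.List.pyGetD uruns j []) (i + 1) 0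
    if rs ≠ 0 ∧ cs ≠ 0 then
      ["<td rowpsan=\"".toList ++ PySem.Int.toChars (rs + 1) ++ "\" colspan=\"".toList
        ++ PySem.Int.toChars (cs + 1) ++ "\"></td>".toList]
    else if rs ≠ 0 then ["<td colspan=\"".toList ++ PySem.Int.toChars (rs + 1) ++ "\"></td>".toList]
    else if cs ≠ 0 then ["<td rowspan=\"".toList ++ PySem.Int.toChars (cs + 1) ++ "\"></td>".toList]
    else ["<td></td>".toList]
  else if e = 'N' then ["</tr>".toList]
  else []

theorem pv_chunkB_cell (g : List (List Char)) (r w : Nat)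
    (hg : g.length = r) (hrow : ∀ row ∈ g, row.length = w)
    (i j : Nat) (hi : i < r) (hj : j < w) :
    (pvChunkB g (g.map (fun row => pvRunsB row 'L'))
      (((PySem.List.pyRange 0 (w : Int) 1).map (fun j =>
          (PySem.List.pyRange 0 (r : Int) 1).map (fun i =>
            PySem.List.pyGetD (PySem.List.pyGetD g i []) j ' '))).map (fun col => pvRunsB col 'U'))
      (i : Int) (j : Int)).flatten
    = pvCell g i j := by
  have hilen : i < g.length := by omega
  have hrowi : g.getD i [] = g[i] := List.getD_eq_getElem g [] hilen
  have hrwlen : (g[i] : List Char).length = w := hrow _ (List.getElem_mem hilen)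
  -- rs lookup
  have hrs : PySem.List.pyGetD (PySem.List.pyGetD (g.map (fun row => pvRunsB row 'L')) (i : Int) [])
      ((j : Int) + 1) 0 = pvCountContig ((g.getD i []).drop (j + 1)) 'L' := by
    rw [PySem.List.pyGetD_natCast]
    rw [List.getD_eq_getElem (g.map (fun row => pvRunsB row 'L')) [] (by simpa using hilen)]
    rw [List.getElem_map]
    have h1 : ((j : Int) + 1) = ((j + 1 : Nat) : Int) := by push_cast; ring
    rw [h1, PySem.List.pyGetD_natCast, pvRunsB_eq, pvRunsRec_getD _ _ _ (by rw [hrwlen]; omega), hrowi]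
  -- column value
  have hcols : ((PySem.List.pyRange 0 (w : Int) 1).map (fun j =>
      (PySem.List.pyRange 0 (r : Int) 1).map (fun i =>
        PySem.List.pyGetD (PySem.List.pyGetD g i []) j ' ')))
      = (List.range w).map (fun j => pvColC g j) := by
    rw [pv_pyRange_nat w, List.map_map]
    apply List.map_congr_left
    intro j' _
    simp only [Function.comp_apply]
    rw [pv_pyRange_nat r, List.map_map]
    have : ((fun i => PySem.List.pyGetD (PySem.List.pyGetD g i []) (j' : Int) ' ') ∘ fun (k : Nat) => (k : Int))
        = (fun i : Nat => (fun row : List Char => row.getD j' ' ') (g.getD i [])) := by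
      funext k
      simp only [Function.comp_apply, PySem.List.pyGetD_natCast]
    rw [this, ← hg, pv_map_range_getD g [] (fun row => row.getD j' ' ')]
    rfl
  have hcs : PySem.List.pyGetD (PySem.List.pyGetD
      (((PySem.List.pyRange 0 (w : Int) 1).map (fun j =>
        (PySem.List.pyRange 0 (r : Int) 1).map (fun i =>
          PySem.List.pyGetD (PySem.List.pyGetD g i []) j ' '))).map (fun col => pvRunsB col 'U')) (j : Int) [])
      ((i : Int) + 1) 0 = pvCountContig ((pvColC g j).drop (i + 1)) 'U' := by
    rw [hcols, List.map_map, PySem.List.pyGetD_natCast]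
    rw [List.getD_eq_getElem _ [] (by simpa using hj)]
    rw [List.getElem_map, List.getElem_range]
    simp only [Function.comp_apply]
    have h1 : ((i : Int) + 1) = ((i + 1 : Nat) : Int) := by push_cast; ring
    have hclen : (pvColC g j).length = r := by simp [pvColC, hg]
    rw [h1, PySem.List.pyGetD_natCast, pvRunsB_eq, pvRunsRec_getD _ _ _ (by rw [hclen]; omega)]
  unfold pvChunkB pvCell
  dsimp only
  rw [hrs, hcs]
  simp only [PySem.List.pyGetD_natCast]
  by_cases he : ((g.getD i []).getD j ' ') = 'C'
  · rw [if_pos he, if_pos he]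
    unfold pvTd
    set rs := pvCountContig ((g.getD i []).drop (j + 1)) 'L' with hrsd
    set cs := pvCountContig ((pvColC g j).drop (i + 1)) 'U' with hcsd
    by_cases h1 : rs = 0 <;> by_cases h2 : cs = 0
    · rw [if_neg (by tauto), if_neg (by tauto), if_neg (by tauto), if_neg (by tauto),
        if_neg (by tauto), if_neg (by tauto)]
      simp
    · rw [if_neg (by tauto), if_neg (by tauto), if_pos (by tauto), if_neg (by tauto),
        if_neg (by tauto), if_pos (by tauto)]
      simp
    · rw [if_neg (by tauto), if_pos (by tauto), if_neg (by tauto), if_pos (by tauto)]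
      simp
    · rw [if_pos (by tauto), if_pos (by tauto)]
      simp
  · rw [if_neg he, if_neg he]
    by_cases hn : ((g.getD i []).getD j ' ') = 'N'
    · rw [if_pos hn, if_pos hn]
      simp
    · rw [if_neg hn, if_neg hn]
      rfl

theorem pvB_canon (str : String) (R C : Int) (r w : Nat)
    (hR : R = (r : Int)) (hC : C + 1 = (w : Int)) (hr : 1 ≤ r) (hw : 1 ≤ w) :
    convert_to_html_alt str R C = String.ofList (pvCanon str.toList r w) := by
  have hn : 1 ≤ w * r := Nat.mul_pos hw hr
  unfold convert_to_html_alt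
  dsimp only
  rw [hR, hC]
  have hmul : (w : Int) * (r : Int) = ((w * r : Nat) : Int) := by push_cast; ring
  rw [hmul, pv_fixB str.toList (w * r) hn]
  have hlen : (pvFixS str.toList (w * r)).length = w * r := pvFixS_length _ _ hn
  rw [pv_gridB (pvFixS str.toList (w * r)) r w hlen]
  set g := pvGrid (pvFixS str.toList (w * r)) r w with hgdef
  set lr := List.map (fun row => pvRunsB row 'L') g with hlr
  set ur := List.map (fun col => pvRunsB col 'U')
      (List.map (fun j => List.map (fun i => PySem.List.pyGetD (PySem.List.pyGetD g i []) j ' ')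
        (PySem.List.pyRange 0 (r : Int) 1)) (PySem.List.pyRange 0 (w : Int) 1)) with hur
  have hstep : ∀ i : Int,
      (fun (parts : List (List Char)) (j : Int) =>
        if PySem.List.pyGetD (PySem.List.pyGetD g i []) j ' ' = 'C' then
          if PySem.List.pyGetD (PySem.List.pyGetD lr i []) (j + 1) 0 ≠ 0 ∧
              PySem.List.pyGetD (PySem.List.pyGetD ur j []) (i + 1) 0 ≠ 0 then
            parts ++
              ["<td rowpsan=\"".toList ++
                  PySem.Int.toChars (PySem.List.pyGetD (PySem.List.pyGetD lr i []) (j + 1) 0 + 1) ++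
                  "\" colspan=\"".toList ++
                  PySem.Int.toChars (PySem.List.pyGetD (PySem.List.pyGetD ur j []) (i + 1) 0 + 1) ++
                  "\"></td>".toList]
          else if PySem.List.pyGetD (PySem.List.pyGetD lr i []) (j + 1) 0 ≠ 0 then
            parts ++
              ["<td colspan=\"".toList ++
                  PySem.Int.toChars (PySem.List.pyGetD (PySem.List.pyGetD lr i []) (j + 1) 0 + 1) ++
                  "\"></td>".toList]
          else if PySem.List.pyGetD (PySem.List.pyGetD ur j []) (i + 1) 0 ≠ 0 then
            parts ++
              ["<td rowspan=\"".toList ++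
                  PySem.Int.toChars (PySem.List.pyGetD (PySem.List.pyGetD ur j []) (i + 1) 0 + 1) ++
                  "\"></td>".toList]
          else parts ++ ["<td></td>".toList]
        else if PySem.List.pyGetD (PySem.List.pyGetD g i []) j ' ' = 'N' then
          parts ++ ["</tr>".toList]
        else parts)
      = (fun (parts : List (List Char)) (j : Int) => parts ++ pvChunkB g lr ur i j) := by
    intro i
    funext parts j
    unfold pvChunkB
    dsimp only
    split_ifs <;> simp
  simp only [hstep, PySem.List.foldl_append_eq_flatMap]
  have houter :
      (fun (parts : List (List Char)) (i : Int) =>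
        (parts ++ ["<tr>".toList]) ++ (PySem.List.pyRange 0 (w : Int) 1).flatMap (fun j => pvChunkB g lr ur i j))
      = (fun (parts : List (List Char)) (i : Int) =>
        parts ++ (["<tr>".toList] ++ (PySem.List.pyRange 0 (w : Int) 1).flatMap (fun j => pvChunkB g lr ur i j))) := by
    funext parts i
    simp
  rw [houter, PySem.List.foldl_append_eq_flatMap, pv_join_nil]
  have hglen : g.length = r := pv_grid_length _ _ _
  have hrowlen : ∀ row ∈ g, row.length = w := by
    intro row hrow
    exact pv_grid_row_length _ _ _ hlen row (hgdef ▸ hrow)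
  simp only [List.flatten_append, List.flatten_cons, List.flatten_nil, List.append_nil]
  rw [pv_pyRange_nat r]
  simp only [List.flatMap_map]
  rw [pv_flatten_flatMap]
  unfold pvCanon
  dsimp only
  rw [← hgdef]
  congr 2
  congr 1
  apply List.flatMap_congr
  intro i hi
  simp only [List.mem_range] at hi
  have hflat : (["<tr>".toList] ++ (PySem.List.pyRange 0 (w : Int) 1).flatMap
      (fun j => pvChunkB g lr ur (i : Int) j)).flatten
      = "<tr>".toList ++ ((PySem.List.pyRange 0 (w : Int) 1).flatMap
      (fun j => pvChunkB g lr ur (i : Int) j)).flatten := by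
    simp
  rw [hflat, pv_pyRange_nat w]
  simp only [List.flatMap_map]
  rw [pv_flatten_flatMap]
  congr 1
  apply List.flatMap_congr
  intro j hj
  simp only [List.mem_range] at hj
  rw [hlr, hur]
  exact pv_chunkB_cell g r w hglen hrowlen i j hi hj

-- ===== VERDICT (by name: the statement is the Claim_ definition above) =====

theorem convert_to_html_spec : Claim_equal_convert_to_html := by
  intro str R C _ hpre
  unfold Pre_convert_to_html at hpre
  obtain ⟨h1, h2⟩ := hpre
  unfold Spec_convert_to_html
  have hR : R = (R.toNat : Int) := by omega
  have hC : C + 1 = ((C + 1).toNat : Int) := by omega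
  have hr : 1 ≤ R.toNat := by omega
  have hw : 1 ≤ (C + 1).toNat := by omega
  rw [pvA_canon str R C R.toNat (C + 1).toNat hR hC hr hw,
      pvB_canon str R C R.toNat (C + 1).toNat hR hC hr hw]
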